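-- pv_equiv track=rewrite | github.com/tangyouze/xiangqi-ralph-test | scripts/generate_endgames.py | generate_hidden_pieces
-- ===== SOURCE A (Python) =====
-- from collections import Counter
--
-- def generate_hidden_pieces(pieces: list[str]) -> str:
--     """生成暗子字符串
--
--     暗子 = 总棋子 - 明子
--     """
--     # 完整棋子数量
--     full = {
--         "A": 2,
--         "E": 2,
--         "H": 2,
--         "R": 2,
--         "C": 2,
--         "P": 5,
--         "a": 2,
--         "e": 2,
--         "h": 2,
--         "r": 2,
--         "c": 2,
--         "p": 5,
--     }
--
--     # 统计明子数量
--     visible = Counter(pieces)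
--
--     # 计算暗子
--     red_hidden = []
--     black_hidden = []
--
--     for piece, max_count in full.items():
--         hidden_count = max_count - visible.get(piece, 0)
--         if hidden_count > 0:
--             if piece.isupper():
--                 red_hidden.extend([piece] * hidden_count)
--             else:
--                 black_hidden.extend([piece] * hidden_count)
--
--     red_str = "".join(sorted(red_hidden)) if red_hidden else "-"
--     black_str = "".join(sorted(black_hidden)) if black_hidden else "-"
--
--     return f"{red_str}:{black_str}"
-- ===== SOURCE B (Python) =====
-- def generate_hidden_pieces(pieces: list[str]) -> str:
--     """生成暗子字符串: start from the full sorted multisets of each side and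
--     delete one occurrence for every visible piece; what is left is hidden."""
--     red = list("AACCEEHHPPPPPRR")
--     black = list("aacceehhppppprr")
--     for p in pieces:
--         if p in red:
--             red.remove(p)
--         elif p in black:
--             black.remove(p)
--     return ("".join(red) or "-") + ":" + ("".join(black) or "-")
-- ===== Notes on version B (the rewrite author's own statement) =====
-- stated objective: alternative
-- what changed: Instead of A's count-the-visible-pieces pass followed by a per-key deficit loop that builds and then sorts two lists, B starts from the literal full sorted multiset of each side and deletes one occurrence per visible piece (list.remove), so no counter, no subtraction and no sort are needed.
import Mathlib
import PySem

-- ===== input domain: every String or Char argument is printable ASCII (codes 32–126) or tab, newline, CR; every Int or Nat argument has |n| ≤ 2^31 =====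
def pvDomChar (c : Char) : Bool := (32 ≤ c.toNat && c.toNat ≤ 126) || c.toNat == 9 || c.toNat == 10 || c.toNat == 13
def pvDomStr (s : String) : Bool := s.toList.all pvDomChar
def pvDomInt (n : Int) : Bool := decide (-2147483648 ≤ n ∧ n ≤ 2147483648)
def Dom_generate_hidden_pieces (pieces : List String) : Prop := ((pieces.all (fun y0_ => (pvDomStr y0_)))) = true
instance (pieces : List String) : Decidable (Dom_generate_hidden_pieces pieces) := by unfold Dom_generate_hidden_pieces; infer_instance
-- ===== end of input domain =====

-- B starts from the full sorted multiset of each side and deletes one occurrence per visible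
-- piece, instead of A's counting pass followed by a per-key deficit loop (objective: simpler; same cost).

-- ===== PORT A =====
-- the literal `full` table of A
def pvFull : List (String × Int) :=
  [("A", 2), ("E", 2), ("H", 2), ("R", 2), ("C", 2), ("P", 5),
   ("a", 2), ("e", 2), ("h", 2), ("r", 2), ("c", 2), ("p", 5)]

-- str.isupper, exact on the one-character ASCII-letter keys it is applied to
-- (≥ 1 cased character and no cased character of the other case)
def pvIsUpperStr (s : String) : Bool :=
  s.toList.any (fun c => c.isUpper) && s.toList.all (fun c => !c.isLower)

def generate_hidden_pieces (pieces : List String) : String :=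
  let visible := PySem.Dict.counter pieces
  let p :=
    pvFull.foldl
      (fun (acc : List String × List String) km =>
        if km.2 - visible.getD km.1 0 > 0 then
          if pvIsUpperStr km.1 then
            (acc.1 ++ List.replicate (km.2 - visible.getD km.1 0).toNat km.1, acc.2)
          else
            (acc.1, acc.2 ++ List.replicate (km.2 - visible.getD km.1 0).toNat km.1)
        else acc)
      ([], [])
  let red_hidden := p.1
  let black_hidden := p.2
  let red_str := if red_hidden ≠ [] then
      PySem.Str.join "" (PySem.List.sorted red_hidden (fun x => x)) else "-"
  let black_str := if black_hidden ≠ [] then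
      PySem.Str.join "" (PySem.List.sorted black_hidden (fun x => x)) else "-"
  red_str ++ ":" ++ black_str

-- ===== PORT B =====
-- list("AACCEEHHPPPPPRR") / list("aacceehhppppprr"): the full sorted multiset of each side
def pvRedFull : List String :=
  ["A", "A", "C", "C", "E", "E", "H", "H", "P", "P", "P", "P", "P", "R", "R"]
def pvBlackFull : List String :=
  ["a", "a", "c", "c", "e", "e", "h", "h", "p", "p", "p", "p", "p", "r", "r"]

def generate_hidden_pieces_alt (pieces : List String) : String :=
  let p :=
    pieces.foldl
      (fun (acc : List String × List String) q =>
        if acc.1.contains q then (acc.1.erase q, acc.2)        -- red.remove(p)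
        else if acc.2.contains q then (acc.1, acc.2.erase q)   -- black.remove(p)
        else acc)
      (pvRedFull, pvBlackFull)
  let red_str := PySem.Str.join "" p.1
  let black_str := PySem.Str.join "" p.2
  (if red_str ≠ "" then red_str else "-") ++ ":" ++ (if black_str ≠ "" then black_str else "-")

-- ===== PRECONDITION & SPEC =====
def Spec_generate_hidden_pieces (pieces : List String) (out : String) : Prop := out = generate_hidden_pieces_alt pieces
instance (pieces : List String) (out : String) : Decidable (Spec_generate_hidden_pieces pieces out) := by unfold Spec_generate_hidden_pieces; infer_instance

-- ===== CLAIM (what is proved, stated in full; the proofs are below) =====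
def Claim_equal_generate_hidden_pieces : Prop := ∀ (pieces : List String), Dom_generate_hidden_pieces pieces → Spec_generate_hidden_pieces pieces (generate_hidden_pieces pieces)

-- ===== LEMMAS AND PROOFS =====

-- A's element multiset for one side, parametrised by the visible counter
def pvElems (d : PySem.Dict String Int) (full : List (String × Int)) : List String :=
  ((full.map (fun km => (km.1, km.2 - d.getD km.1 0))).filter (fun kn => decide (kn.2 > 0))).flatMap
    (fun kn => List.replicate kn.2.toNat kn.1)

lemma pvElems_cons (d : PySem.Dict String Int) (k : String) (m : Int) (t : List (String × Int)) :
    pvElems d ((k, m) :: t) =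
      (if m - d.getD k 0 > 0 then List.replicate (m - d.getD k 0).toNat k else []) ++ pvElems d t := by
  by_cases h : m - d.getD k 0 > 0
  · have h' : d.getD k 0 < m := by omega
    simp [pvElems, h']
  · have h' : ¬ d.getD k 0 < m := by omega
    simp [pvElems, h']

-- A's loop appends the uppercase part of pvElems to the red accumulator
-- and the non-uppercase part to the black accumulator
lemma foldl_split (d : PySem.Dict String Int) (full : List (String × Int)) (r b : List String) :
    full.foldl
      (fun (acc : List String × List String) km =>
        if km.2 - d.getD km.1 0 > 0 then
          if pvIsUpperStr km.1 then
            (acc.1 ++ List.replicate (km.2 - d.getD km.1 0).toNat km.1, acc.2)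
          else
            (acc.1, acc.2 ++ List.replicate (km.2 - d.getD km.1 0).toNat km.1)
        else acc)
      (r, b)
    = (r ++ (pvElems d full).filter pvIsUpperStr,
       b ++ (pvElems d full).filter (fun s => !pvIsUpperStr s)) := by
  induction full generalizing r b with
  | nil => simp [pvElems]
  | cons km t ih =>
    obtain ⟨k, m⟩ := km
    rw [List.foldl_cons, pvElems_cons]
    by_cases h1 : m - d.getD k 0 > 0
    · by_cases h2 : pvIsUpperStr k
      · simp only [if_pos h1, if_pos h2, ih]
        simp [h2, List.filter_append, List.append_assoc]
      · simp only [if_pos h1, if_neg h2, ih]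
        simp [h2, List.filter_append, List.append_assoc]
    · simp only [if_neg h1, ih]
      simp

-- B's combined loop is two independent erase-folds, because red and black never share an element
lemma fold2_eq (ps : List String) (r b : List String) (hdisj : ∀ x, x ∈ r → x ∉ b) :
    ps.foldl
      (fun (acc : List String × List String) q =>
        if acc.1.contains q then (acc.1.erase q, acc.2)
        else if acc.2.contains q then (acc.1, acc.2.erase q)
        else acc)
      (r, b)
    = (ps.foldl (fun l q => l.erase q) r, ps.foldl (fun l q => l.erase q) b) := by
  induction ps generalizing r b with
  | nil => simp
  | cons p t ih =>
    simp only [List.foldl_cons]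
    by_cases h1 : r.contains p
    · have hpr : p ∈ r := by simpa using h1
      have hpb : p ∉ b := hdisj p hpr
      rw [if_pos h1, ih _ _ (fun x hx => hdisj x (List.mem_of_mem_erase hx)),
        List.erase_of_not_mem hpb]
    · have hpr : p ∉ r := by simpa using h1
      rw [if_neg h1, List.erase_of_not_mem hpr]
      by_cases h2 : b.contains p
      · rw [if_pos h2, ih _ _ (fun x hx hb => hdisj x hx (List.mem_of_mem_erase hb))]
      · have hpb : p ∉ b := by simpa using h2
        rw [if_neg h2, List.erase_of_not_mem hpb]
        exact ih r b hdisj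

lemma foldl_erase_sublist (ps : List String) (l : List String) :
    (ps.foldl (fun l q => l.erase q) l).Sublist l := by
  induction ps generalizing l with
  | nil => simp
  | cons p t ih => exact (ih (l.erase p)).trans (List.erase_sublist ..)

lemma count_foldl_erase (ps : List String) (l : List String) (c : String) :
    (ps.foldl (fun l q => l.erase q) l).count c = l.count c - ps.count c := by
  induction ps generalizing l with
  | nil => simp
  | cons p t ih =>
    rw [List.foldl_cons, ih, List.count_erase, List.count_cons]
    by_cases h : c = p <;> simp [h] <;> omega

lemma count_pvElems (d : PySem.Dict String Int) (full : List (String × Int)) (c : String) :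
    (pvElems d full).count c =
      (full.map (fun km => if km.1 == c then (km.2 - d.getD km.1 0).toNat else 0)).sum := by
  induction full with
  | nil => simp [pvElems]
  | cons km t ih =>
    obtain ⟨k, m⟩ := km
    rw [pvElems_cons, List.count_append, ih]
    by_cases h : m - d.getD k 0 > 0
    · simp only [if_pos h, List.map_cons, List.sum_cons, List.count_replicate]
    · have h0 : (m - d.getD k 0).toNat = 0 := by omega
      simp [h0]

-- count of c in a filtered list, both polarities
lemma count_filter_pos {p : String → Bool} {c : String} (l : List String) (h : p c = true) :
    (l.filter p).count c = l.count c := List.count_filter h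

lemma count_filter_neg {p : String → Bool} {c : String} (l : List String) (h : p c = false) :
    (l.filter p).count c = 0 := by
  apply List.count_eq_zero_of_not_mem
  intro hmem
  have := List.of_mem_filter hmem
  simp [h] at this

-- per-element count agreement, red side
lemma count_red (pieces : List String) (c : String) :
    ((pvElems (PySem.Dict.counter pieces) pvFull).filter pvIsUpperStr).count c =
      pvRedFull.count c - pieces.count c := by
  by_cases hu : pvIsUpperStr c
  · rw [count_filter_pos _ hu, count_pvElems]
    simp only [pvFull, List.map_cons, List.map_nil, List.sum_cons, List.sum_nil,
      PySem.Dict.getD_counter]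
    by_cases hA : c = "A"
    · subst hA; simp [pvRedFull]
    by_cases hE : c = "E"
    · subst hE; simp [pvRedFull]
    by_cases hH : c = "H"
    · subst hH; simp [pvRedFull]
    by_cases hR : c = "R"
    · subst hR; simp [pvRedFull]
    by_cases hC : c = "C"
    · subst hC; simp [pvRedFull]
    by_cases hP : c = "P"
    · subst hP; simp [pvRedFull]
    by_cases ha : c = "a"
    · subst ha; exact absurd hu (by decide)
    by_cases he : c = "e"
    · subst he; exact absurd hu (by decide)
    by_cases hh : c = "h"
    · subst hh; exact absurd hu (by decide)
    by_cases hr : c = "r"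
    · subst hr; exact absurd hu (by decide)
    by_cases hc : c = "c"
    · subst hc; exact absurd hu (by decide)
    by_cases hp : c = "p"
    · subst hp; exact absurd hu (by decide)
    have hz : pvRedFull.count c = 0 := by
      apply List.count_eq_zero_of_not_mem
      simp [pvRedFull]
      exact ⟨hA, hC, hE, hH, hP, hR⟩
    simp [Ne.symm hA, Ne.symm hE, Ne.symm hH, Ne.symm hR, Ne.symm hC, Ne.symm hP,
      Ne.symm ha, Ne.symm he, Ne.symm hh, Ne.symm hr, Ne.symm hc, Ne.symm hp, hz]
  · rw [count_filter_neg _ (by simpa using hu)]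
    have hz : pvRedFull.count c = 0 := by
      apply List.count_eq_zero_of_not_mem
      intro hmem
      have : pvIsUpperStr c = true := by
        fin_cases hmem <;> decide
      simp [this] at hu
    omega

-- per-element count agreement, black side
lemma count_black (pieces : List String) (c : String) :
    ((pvElems (PySem.Dict.counter pieces) pvFull).filter (fun s => !pvIsUpperStr s)).count c =
      pvBlackFull.count c - pieces.count c := by
  by_cases hu : pvIsUpperStr c
  · rw [count_filter_neg _ (by simp [hu])]
    have hz : pvBlackFull.count c = 0 := by
      apply List.count_eq_zero_of_not_mem
      intro hmem
      have : pvIsUpperStr c = false := by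
        fin_cases hmem <;> decide
      simp [this] at hu
    omega
  · rw [count_filter_pos _ (by simpa using hu), count_pvElems]
    simp only [pvFull, List.map_cons, List.map_nil, List.sum_cons, List.sum_nil,
      PySem.Dict.getD_counter]
    by_cases hA : c = "A"
    · subst hA; exact absurd (by decide) hu
    by_cases hE : c = "E"
    · subst hE; exact absurd (by decide) hu
    by_cases hH : c = "H"
    · subst hH; exact absurd (by decide) hu
    by_cases hR : c = "R"
    · subst hR; exact absurd (by decide) hu
    by_cases hC : c = "C"
    · subst hC; exact absurd (by decide) hu
    by_cases hP : c = "P"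
    · subst hP; exact absurd (by decide) hu
    by_cases ha : c = "a"
    · subst ha; simp [pvBlackFull]
    by_cases he : c = "e"
    · subst he; simp [pvBlackFull]
    by_cases hh : c = "h"
    · subst hh; simp [pvBlackFull]
    by_cases hr : c = "r"
    · subst hr; simp [pvBlackFull]
    by_cases hc : c = "c"
    · subst hc; simp [pvBlackFull]
    by_cases hp : c = "p"
    · subst hp; simp [pvBlackFull]
    have hz : pvBlackFull.count c = 0 := by
      apply List.count_eq_zero_of_not_mem
      simp [pvBlackFull]
      exact ⟨ha, hc, he, hh, hp, hr⟩
    simp [Ne.symm hA, Ne.symm hE, Ne.symm hH, Ne.symm hR, Ne.symm hC, Ne.symm hP,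
      Ne.symm ha, Ne.symm he, Ne.symm hh, Ne.symm hr, Ne.symm hc, Ne.symm hp, hz]

-- A's side list sorts to exactly B's erase-fold result
lemma sorted_side (pieces : List String) (side : List String) (fullSide : List String)
    (hcnt : ∀ c, side.count c = fullSide.count c - pieces.count c)
    (hpw : fullSide.Pairwise (· ≤ ·)) :
    PySem.List.sorted side (fun x => x) = pieces.foldl (fun l q => l.erase q) fullSide := by
  apply PySem.List.sorted_id_eq_of_perm_of_pairwise
  · rw [List.perm_iff_count]
    intro c
    rw [count_foldl_erase, hcnt]
  · exact List.Pairwise.sublist (foldl_erase_sublist pieces fullSide) hpw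

-- join with empty separator of a list of nonempty strings is empty iff the list is
lemma join_ne_empty (l : List String) (hne : ∀ s ∈ l, s ≠ "") (h : l ≠ []) :
    PySem.Str.join "" l ≠ "" := by
  match l with
  | [] => exact absurd rfl h
  | s :: t =>
    have hs : s ≠ "" := hne s (by simp)
    intro hj
    have h2 := congrArg String.toList hj
    simp [pysem] at h2
    have hsl : s.toList = [] := by
      cases t with
      | nil => simpa [PySem.Chars.join_singleton] using h2
      | cons u t =>
        rw [List.map_cons, PySem.Chars.join_cons_cons] at h2
        simpa using (List.append_eq_nil_iff.mp h2).1
    exact hs (by cases s; simp at hsl; simp [hsl])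

-- one side of the returned string: A's test-then-sort-then-join equals B's join-then-test
lemma side_eq (X F ps : List String)
    (h : PySem.List.sorted X (fun x => x) = ps.foldl (fun l q => l.erase q) F)
    (hne : ∀ s ∈ F, s ≠ "") :
    (if X ≠ [] then PySem.Str.join "" (PySem.List.sorted X (fun x => x)) else "-")
      = (if PySem.Str.join "" (ps.foldl (fun l q => l.erase q) F) ≠ "" then
          PySem.Str.join "" (ps.foldl (fun l q => l.erase q) F) else "-") := by
  by_cases hL : ps.foldl (fun l q => l.erase q) F = []
  · have hX : X = [] := by
      rw [← PySem.List.sorted_eq_nil_iff (key := fun x => x) (rev := false), h, hL]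
    have hj0 : PySem.Str.join "" ([] : List String) = "" := rfl
    rw [hL]
    simp [hX, hj0]
  · have hX : X ≠ [] := by
      intro hx
      exact hL (by rw [← h, hx]; rfl)
    have hj : PySem.Str.join "" (ps.foldl (fun l q => l.erase q) F) ≠ "" :=
      join_ne_empty _ (fun s hs => hne s ((foldl_erase_sublist ps F).subset hs)) hL
    rw [if_pos hX, if_pos hj, h]

-- ===== VERDICT (by name: the statement is the Claim_ definition above) =====
theorem generate_hidden_pieces_spec : Claim_equal_generate_hidden_pieces := by
  intro pieces _
  unfold Spec_generate_hidden_pieces generate_hidden_pieces generate_hidden_pieces_alt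
  simp only []
  rw [foldl_split (PySem.Dict.counter pieces) pvFull [] [],
    fold2_eq pieces pvRedFull pvBlackFull (by decide)]
  simp only [List.nil_append]
  have hred := sorted_side pieces _ pvRedFull (count_red pieces) (by norm_num; decide)
  have hblack := sorted_side pieces _ pvBlackFull (count_black pieces) (by norm_num; decide)
  rw [side_eq _ pvRedFull pieces hred (by decide),
    side_eq _ pvBlackFull pieces hblack (by decide)]
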